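-- pv_equiv track=rewrite | github.com/20130353/Leetcode | target_offer/dfs+bfs+动态规划/字符串--区间动规/回文分割成回文.py | get_huiwen
-- ===== SOURCE A (Python) =====
-- def get_huiwen(string):
--     if len(string) <= 0:
--         return 0
--     ans = []
--     for inx in range(len(string)):
--         low, high = 0, inx
--         while low < high and low < len(string) and high >= 0 and string[low] == string[high]:
--             low += 1
--             high -= 1
--         if string[low] == string[high]:
--             ans.append(inx)
--     return ans
-- ===== SOURCE B (Python) =====
-- def get_huiwen(string):
--     ans = []
--     rev = ""
--     for i, ch in enumerate(string):
--         rev = ch + rev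
--         if string[:i + 1] == rev:
--             ans.append(i)
--     return ans
-- ===== Notes on version B (the rewrite author's own statement) =====
-- stated objective: alternative
-- what changed: B replaces A's per-index two-pointer while-loop (with its redundant bound checks and post-loop re-comparison) by a single enumerate pass that maintains the reversed prefix incrementally and compares prefix == reversed prefix; the comparison runs at C speed instead of a per-character Python loop.
-- outside the precondition, e.g. on get_huiwen(''): A returns 0, B returns []
import Mathlib
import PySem

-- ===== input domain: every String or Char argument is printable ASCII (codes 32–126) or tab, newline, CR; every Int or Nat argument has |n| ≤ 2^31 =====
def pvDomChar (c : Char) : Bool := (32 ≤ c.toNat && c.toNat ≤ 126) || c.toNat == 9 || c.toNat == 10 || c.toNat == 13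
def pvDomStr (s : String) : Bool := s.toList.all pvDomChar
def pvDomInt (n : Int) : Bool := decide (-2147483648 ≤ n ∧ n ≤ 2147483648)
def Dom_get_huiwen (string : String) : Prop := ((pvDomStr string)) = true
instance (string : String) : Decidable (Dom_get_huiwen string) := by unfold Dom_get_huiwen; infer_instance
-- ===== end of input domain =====

-- B replaces A's per-index two-pointer while-loop by a single enumerate pass that maintains the
-- reversed prefix incrementally and compares prefix == reversed prefix (simpler; same asymptotic cost).

-- ===== PORT A =====
-- the inner while-loop of A: advances low/high while low < high, low in range, high >= 0, chars equal
def aLoop (cs : List Char) (low high : Int) : Int × Int :=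
  if h : low < high ∧ low < (cs.length : Int) ∧ 0 ≤ high ∧
         PySem.List.pyGet? cs low = PySem.List.pyGet? cs high then
    aLoop cs (low + 1) (high - 1)
  else (low, high)
termination_by (high - low).toNat
decreasing_by omega

def get_huiwen (string : String) : List Int :=
  let cs := string.toList
  if (cs.length : Int) ≤ 0 then []
    -- Python returns the int 0 here (not a list); this input is excluded by Pre_
  else
    (PySem.List.pyRange 0 (cs.length : Int) 1).foldl
      (fun ans inx =>
        let p := aLoop cs 0 inx
        if PySem.List.pyGet? cs p.1 = PySem.List.pyGet? cs p.2 then ans ++ [inx] else ans)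
      []

-- ===== PORT B =====
-- the body of B's for-loop over enumerate(string): state (rev, ans)
def bStep (cs : List Char) (st : List Char × List Int) (p : Int × Char) : List Char × List Int :=
  let rev := p.2 :: st.1
  (rev, if PySem.List.slice cs none (some (p.1 + 1)) = rev then st.2 ++ [p.1] else st.2)

def get_huiwen_alt (string : String) : List Int :=
  let cs := string.toList
  ((PySem.List.enumerate cs).foldl (bStep cs) ([], [])).2

-- ===== PRECONDITION & SPEC =====
-- Pre_ excludes only the empty string, on which A returns the int 0, which is not a value of the
-- declared return type list[int]; B returns [] there.
def Pre_get_huiwen (string : String) : Prop := string ≠ ""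
instance (string : String) : Decidable (Pre_get_huiwen string) := by unfold Pre_get_huiwen; infer_instance
def pvWitness_get_huiwen : String := "aba"

def Spec_get_huiwen (string : String) (out : List Int) : Prop := out = get_huiwen_alt string
instance (string : String) (out : List Int) : Decidable (Spec_get_huiwen string out) := by unfold Spec_get_huiwen; infer_instance

-- ===== CLAIM (what is proved, stated in full; the proofs are below) =====
def Claim_equal_get_huiwen : Prop := ∀ (string : String), Dom_get_huiwen string → Pre_get_huiwen string → Spec_get_huiwen string (get_huiwen string)

-- ===== LEMMAS AND PROOFS =====

-- the symmetric-segment condition A's two-pointer loop decides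
def pvSym (cs : List Char) (low high : Int) : Prop :=
  ∀ k : Int, low ≤ k → k ≤ high → PySem.List.pyGet? cs k = PySem.List.pyGet? cs (low + high - k)

lemma aLoop_iff (cs : List Char) :
    ∀ (n : Nat) (low high : Int), (high - low).toNat = n → 0 ≤ low → high < (cs.length : Int) →
    low ≤ high →
    ((PySem.List.pyGet? cs (aLoop cs low high).1 = PySem.List.pyGet? cs (aLoop cs low high).2)
      ↔ pvSym cs low high) := by
  intro n
  induction n using Nat.strong_induction_on with
  | _ n ih =>
    intro low high hn h0 hlen hle
    rw [aLoop]
    by_cases hg : low < high ∧ low < (cs.length : Int) ∧ 0 ≤ high ∧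
        PySem.List.pyGet? cs low = PySem.List.pyGet? cs high
    · rw [dif_pos hg]
      obtain ⟨hlh, -, -, heq⟩ := hg
      by_cases hin : low + 1 ≤ high - 1
      · rw [ih ((high - 1) - (low + 1)).toNat (by omega) (low + 1) (high - 1) rfl
            (by omega) (by omega) hin]
        constructor
        · intro hs k hk1 hk2
          by_cases hkl : k = low
          · subst hkl; simpa using heq
          · by_cases hkh : k = high
            · rw [hkh]
              have e : low + high - high = low := by omega
              rw [e]; exact heq.symm
            · have h2 := hs k (by omega) (by omega)
              have e : (low + 1) + (high - 1) - k = low + high - k := by omega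
              rwa [e] at h2
        · intro hs k hk1 hk2
          have e : low + high - k = (low + 1) + (high - 1) - k := by omega
          rw [← e]; exact hs k (by omega) (by omega)
      · -- high = low + 1: unfold once more, the inner guard fails (low+1 > high-1)
        have hhl : high = low + 1 := by omega
        subst hhl
        have e : low + 1 - 1 = low := by omega
        rw [e, aLoop, dif_neg (by intro h; omega)]
        constructor
        · intro _ k hk1 hk2
          by_cases hk : k = low
          · rw [hk]
            have e2 : low + (low + 1) - low = low + 1 := by omega
            rw [e2]; exact heq
          · have hk' : k = low + 1 := by omega
            rw [hk']
            have e2 : low + (low + 1) - (low + 1) = low := by omega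
            rw [e2]; exact heq.symm
        · intro _
          exact heq.symm
    · rw [dif_neg hg]
      by_cases hlh : low < high
      · have hne : PySem.List.pyGet? cs low ≠ PySem.List.pyGet? cs high := by
          intro he; exact hg ⟨hlh, by omega, by omega, he⟩
        constructor
        · intro he; exact absurd he hne
        · intro hs
          have h2 := hs low (le_refl _) (by omega)
          have e : low + high - low = high := by omega
          rw [e] at h2
          exact absurd h2 hne
      · have : low = high := by omega
        subst this
        constructor
        · intro _ k hk1 hk2
          have hk : k = low := by omega
          rw [hk]
          have e : low + low - low = low := by omega
          rw [e]
        · intro _; rfl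

-- palindromic prefix ↔ symmetric segment from 0 to i
lemma take_palindrome_iff (cs : List Char) (i : Nat) (hi : i < cs.length) :
    (cs.take (i + 1) = (cs.take (i + 1)).reverse) ↔ pvSym cs 0 (i : Int) := by
  have hlen : (cs.take (i + 1)).length = i + 1 := by
    rw [List.length_take]; omega
  constructor
  · intro hp k hk1 hk2
    obtain ⟨j, rfl⟩ : ∃ j : Nat, k = (j : Int) := ⟨k.toNat, by omega⟩
    have hk : j ≤ i := by omega
    have hsub : (0 : Int) + (i : Int) - (j : Int) = ((i - j : Nat) : Int) := by omega
    rw [hsub, PySem.List.pyGet?_natCast, PySem.List.pyGet?_natCast]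
    have h1 : j < cs.length := by omega
    have h2 : i - j < cs.length := by omega
    rw [List.getElem?_eq_getElem h1, List.getElem?_eq_getElem h2]
    have e1 : cs[j] = (cs.take (i + 1))[j]'(by omega) := by
      simp [List.getElem_take]
    have e2 : cs[i - j] = (cs.take (i + 1)).reverse[j]'(by rw [List.length_reverse, hlen]; omega) := by
      rw [List.getElem_reverse]
      simp only [hlen, List.getElem_take]
      congr 1
    rw [e1, e2]
    congr 1
    exact List.getElem_of_eq hp _
  · intro hs
    apply List.ext_getElem (by rw [List.length_reverse])
    intro j h1 h2
    rw [List.getElem_reverse]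
    simp only [hlen] at h1 ⊢
    have hj : j ≤ i := by omega
    have h3 := hs (j : Int) (by omega) (by omega)
    have hsub : (0 : Int) + (i : Int) - (j : Int) = ((i - j : Nat) : Int) := by omega
    rw [hsub, PySem.List.pyGet?_natCast, PySem.List.pyGet?_natCast] at h3
    have hj1 : j < cs.length := by omega
    have hj2 : i - j < cs.length := by omega
    rw [List.getElem?_eq_getElem hj1, List.getElem?_eq_getElem hj2] at h3
    simp only [Option.some_inj] at h3
    simp only [List.getElem_take]
    have e : i + 1 - 1 - j = i - j := by omega
    simp only [e]
    exact h3

-- A's per-index append condition, as a Bool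
def chkA (cs : List Char) (inx : Int) : Bool :=
  decide (PySem.List.pyGet? cs (aLoop cs 0 inx).1 = PySem.List.pyGet? cs (aLoop cs 0 inx).2)

-- the common specification both ports compute: which prefixes are palindromic
def palAt (cs : List Char) (i : Nat) : Bool := decide (cs.take (i + 1) = (cs.take (i + 1)).reverse)

lemma chkA_eq_palAt (cs : List Char) (i : Nat) (hi : i < cs.length) :
    chkA cs (i : Int) = palAt cs i := by
  unfold chkA palAt
  have h := aLoop_iff cs ((i : Int) - 0).toNat 0 (i : Int) rfl (by omega) (by omega) (by omega)
  have h2 := take_palindrome_iff cs i hi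
  by_cases hp : cs.take (i + 1) = (cs.take (i + 1)).reverse
  · rw [decide_eq_true (h.mpr (h2.mp hp)), decide_eq_true hp]
  · simp only [hp, decide_false]
    rw [decide_eq_false_iff_not]
    intro he
    exact hp (h2.mpr (h.mp he))

lemma A_eq_filter (cs : List Char) (hne : cs ≠ []) :
    (if ((cs.length : Int) ≤ 0) then [] else
      (PySem.List.pyRange 0 (cs.length : Int) 1).foldl
        (fun ans inx =>
          let p := aLoop cs 0 inx
          if PySem.List.pyGet? cs p.1 = PySem.List.pyGet? cs p.2 then ans ++ [inx] else ans)
        [])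
    = ((List.range cs.length).filter (palAt cs)).map (fun i : Nat => (i : Int)) := by
  have hlen : 0 < cs.length := List.length_pos_of_ne_nil hne
  rw [if_neg (by omega)]
  have h1 : ∀ (l : List Int) (acc : List Int),
      l.foldl (fun ans inx =>
          let p := aLoop cs 0 inx
          if PySem.List.pyGet? cs p.1 = PySem.List.pyGet? cs p.2 then ans ++ [inx] else ans) acc
      = l.foldl (fun ans inx => if chkA cs inx = true then ans ++ [inx] else ans) acc := by
    intro l
    induction l with
    | nil => intro acc; rfl
    | cons x xs ihx =>
      intro acc
      simp only [List.foldl_cons, chkA, decide_eq_true_eq]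
  rw [h1, PySem.List.foldl_append_if (fun inx => chkA cs inx) (fun inx => inx), List.nil_append,
      PySem.List.pyRange_zero_nat, List.filter_map]
  have hfc : List.filter ((fun inx => chkA cs inx) ∘ fun k : Nat => (k : Int)) (List.range cs.length)
      = List.filter (palAt cs) (List.range cs.length) := by
    apply List.filter_congr
    intro i hi
    exact chkA_eq_palAt cs i (List.mem_range.mp hi)
  rw [hfc]
  simp

lemma B_inv (cs : List Char) :
    ∀ (suffix : List Char) (n : Nat) (ans : List Int), cs.drop n = suffix →
    ((PySem.List.enumerate suffix (n : Int)).foldl (bStep cs) ((cs.take n).reverse, ans)).2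
      = ans ++ ((List.range' n (cs.length - n)).filter (palAt cs)).map (fun i : Nat => (i : Int)) := by
  intro suffix
  induction suffix with
  | nil =>
    intro n ans hdrop
    have hle : cs.length ≤ n := List.drop_eq_nil_iff.mp hdrop
    rw [PySem.List.enumerate_nil, List.foldl_nil, Nat.sub_eq_zero_of_le hle]
    simp
  | cons c rest ih =>
    intro n ans hdrop
    have hn : n < cs.length := by
      by_contra h
      rw [List.drop_eq_nil_iff.mpr (by omega)] at hdrop
      simp at hdrop
    have hsplit : cs = cs.take n ++ c :: rest := by rw [← hdrop, List.take_append_drop]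
    have hlt : (cs.take n).length = n := by rw [List.length_take]; omega
    have htake : cs.take (n + 1) = cs.take n ++ [c] := by
      conv_lhs => rw [hsplit]
      rw [List.take_append, List.take_of_length_le (by rw [hlt]; omega), hlt]
      simp
    have hrest : cs.drop (n + 1) = rest := by
      have ht : (cs.drop n).tail = rest := by rw [hdrop]; rfl
      rwa [List.tail_drop] at ht
    have hrev : c :: (cs.take n).reverse = (cs.take (n + 1)).reverse := by
      rw [htake, List.reverse_append]
      simp
    have hslice : PySem.List.slice cs none (some ((n : Int) + 1)) = cs.take (n + 1) := by
      rw [PySem.List.slice_to _ (by omega)]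
      congr 1
    have hstep : bStep cs ((cs.take n).reverse, ans) ((n : Int), c)
        = ((cs.take (n + 1)).reverse, if palAt cs n then ans ++ [(n : Int)] else ans) := by
      unfold bStep
      rw [hslice, hrev]
      simp only [palAt, decide_eq_true_eq]
    rw [PySem.List.enumerate_cons, List.foldl_cons, hstep]
    have hrange : List.range' n (cs.length - n) = n :: List.range' (n + 1) (cs.length - (n + 1)) := by
      have e : cs.length - n = (cs.length - (n + 1)) + 1 := by omega
      rw [e, List.range'_succ]
    by_cases hp : palAt cs n
    · rw [if_pos hp]
      have ihh := ih (n + 1) (ans ++ [(n : Int)]) hrest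
      rw [Nat.cast_add, Nat.cast_one] at ihh
      rw [ihh, hrange, List.filter_cons, if_pos hp]
      simp
    · rw [if_neg hp]
      have ihh := ih (n + 1) ans hrest
      rw [Nat.cast_add, Nat.cast_one] at ihh
      rw [ihh, hrange, List.filter_cons, if_neg (by simpa using hp)]

lemma B_eq_filter (cs : List Char) :
    ((PySem.List.enumerate cs).foldl (bStep cs) ([], [])).2
      = ((List.range cs.length).filter (palAt cs)).map (fun i : Nat => (i : Int)) := by
  have h := B_inv cs cs 0 [] (by simp)
  simpa [List.range_eq_range'] using h

-- ===== VERDICT (by name: the statement is the Claim_ definition above) =====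
theorem get_huiwen_spec : Claim_equal_get_huiwen := by
  intro s _ hpre
  unfold Spec_get_huiwen get_huiwen get_huiwen_alt
  have hne : s.toList ≠ [] := by
    intro h
    exact hpre (String.toList_eq_nil_iff.mp h)
  rw [B_eq_filter s.toList]
  exact A_eq_filter s.toList hne
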